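-- pv_equiv track=rewrite | github.com/SteveGoodenough/code-challenges | src/code_challenge_19/challenge_19.py | rotate_map_and_coordinates
-- ===== SOURCE A (Python) =====
-- ROTATIONS = {'E': 0, 'N': 1, 'W': 2, 'S': 3}
--
-- def rotate_map_and_coordinates(map, x, y, orientation):
--     rotated_x = x
--     rotated_y = y
--     rotated_map = map
--     for _ in range(ROTATIONS.get(orientation, 0)):
--         rotated_x, rotated_y = \
--             rotate_coordinates_90_degrees(rotated_x, rotated_y, len(rotated_map) - 1)
--         rotated_map = [list(line) for line in zip(*reversed(rotated_map))]
--     return rotated_map, rotated_x, rotated_y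
--
-- def rotate_coordinates_90_degrees(x, y, map_width):
--     return map_width - y, x
-- ===== SOURCE B (Python) =====
-- ROTATIONS = {'E': 0, 'N': 1, 'W': 2, 'S': 3}
--
-- def rotate_map_and_coordinates(map, x, y, orientation):
--     k = ROTATIONS.get(orientation, 0)
--     if k == 0:
--         return map, x, y
--     h = len(map)
--     w = len(map[0])
--     if k == 1:
--         rotated = [[map[h - 1 - j][i] for j in range(h)] for i in range(w)]
--         return rotated, h - 1 - y, x
--     if k == 2:
--         rotated = [[map[h - 1 - i][w - 1 - j] for j in range(w)] for i in range(h)]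
--         return rotated, w - 1 - x, h - 1 - y
--     rotated = [[map[j][w - 1 - i] for j in range(h)] for i in range(w)]
--     return rotated, y, w - 1 - x
-- ===== Notes on version B (the rewrite author's own statement) =====
-- stated objective: simpler
-- what changed: A rotates the grid 90 degrees k times (rebuilding it via reversed+zip each pass and threading the coordinates through each step); B looks up k once and builds the final grid and coordinates directly with one closed-form index transform per orientation. When a rotation is actually performed (orientation N/W/S), Pre_ excludes empty, ragged and zero-width grids: B's direct indexing raises IndexError on ragged/empty input, and on zero-width grids zip(*) yields no tuples so the two representations of an m-by-0 grid ([] vs m empty rows) are equally defensible.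
-- outside the precondition, e.g. on rotate_map_and_coordinates([['a', 'b'], ['c']], 0, 0, 'N'): A returns ([['c', 'a']], 1, 0), B raises IndexError; on rotate_map_and_coordinates([], 1, 2, 'S'): A returns ([], 2, -2), B raises IndexError; on rotate_map_and_coordinates([[], []], 0, 0, 'W'): A returns ([], -1, 1), B returns ([[], []], -1, 1)
import Mathlib
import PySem

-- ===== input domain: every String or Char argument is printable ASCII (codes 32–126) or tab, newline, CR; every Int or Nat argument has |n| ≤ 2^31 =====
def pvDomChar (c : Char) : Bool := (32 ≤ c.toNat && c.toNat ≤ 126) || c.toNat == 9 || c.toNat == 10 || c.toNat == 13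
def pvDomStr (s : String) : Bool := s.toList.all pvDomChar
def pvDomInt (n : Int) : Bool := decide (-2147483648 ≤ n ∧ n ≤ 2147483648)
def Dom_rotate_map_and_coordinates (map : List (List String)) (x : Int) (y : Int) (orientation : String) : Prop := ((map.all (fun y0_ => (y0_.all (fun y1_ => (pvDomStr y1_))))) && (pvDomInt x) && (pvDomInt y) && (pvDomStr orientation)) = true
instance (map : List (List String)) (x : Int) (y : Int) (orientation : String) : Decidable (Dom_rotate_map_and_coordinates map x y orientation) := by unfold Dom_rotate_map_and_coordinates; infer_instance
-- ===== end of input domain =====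

-- B replaces A's repeated 90°-rotation loop by one closed-form index transform per orientation (simpler: one grid pass, no iterated rebuilds); return value only — neither program mutates its arguments.

-- shared module constant: ROTATIONS = {'E': 0, 'N': 1, 'W': 2, 'S': 3}
def pvROTATIONS : PySem.Dict String Int := PySem.Dict.mk [("E", 0), ("N", 1), ("W", 2), ("S", 3)]

-- ===== PORT A =====
-- min of the row lengths (0 for no rows): the number of tuples zip(*rows) yields
def pvMinLen (rows : List (List String)) : Nat :=
  (PySem.List.min? (rows.map List.length) (fun v => v)).getD 0

-- [list(line) for line in zip(*rows)] : exact — zip(*rows) yields, for each index i below the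
-- minimum row length, the list of the rows' i-th cells (so every getD index here is in range).
def pvZipStar (rows : List (List String)) : List (List String) :=
  (List.range (pvMinLen rows)).map (fun i => rows.map (fun row => row.getD i ""))

def rotate_map_and_coordinates (map : List (List String)) (x : Int) (y : Int) (orientation : String) : List (List String) × Int × Int :=
  let k := pvROTATIONS.getD orientation 0
  -- for _ in range(k): (x, y) := (len(map) - 1 - y, x); map := [list(line) for line in zip(*reversed(map))]
  let st := (List.range k.toNat).foldl
    (fun (st : Int × Int × List (List String)) _ =>
      ((st.2.2.length : Int) - 1 - st.2.1, st.1, pvZipStar st.2.2.reverse))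
    (x, y, map)
  (st.2.2, st.1, st.2.1)

-- ===== PORT B =====
-- map[i][j] (every index used below is in range under Pre_, so getD is exact there)
def pvGet2 (g : List (List String)) (i j : Nat) : String := (g.getD i []).getD j ""

-- [[f i j for j in range(m)] for i in range(w)]
def pvMat (w m : Nat) (f : Nat → Nat → String) : List (List String) :=
  (List.range w).map (fun i => (List.range m).map (fun j => f i j))

def rotate_map_and_coordinates_alt (map : List (List String)) (x : Int) (y : Int) (orientation : String) : List (List String) × Int × Int :=
  let k := pvROTATIONS.getD orientation 0
  if k = 0 then (map, x, y)
  else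
    let h := map.length
    let w := (map.getD 0 []).length   -- len(map[0])
    if k = 1 then
      (pvMat w h (fun i j => pvGet2 map (h - 1 - j) i), (h : Int) - 1 - y, x)
    else if k = 2 then
      (pvMat h w (fun i j => pvGet2 map (h - 1 - i) (w - 1 - j)), (w : Int) - 1 - x, (h : Int) - 1 - y)
    else
      (pvMat w h (fun i j => pvGet2 map j (w - 1 - i)), y, (w : Int) - 1 - x)

-- ===== PRECONDITION & SPEC =====
-- When a rotation is actually performed (orientation N/W/S), Pre_ excludes empty, ragged and
-- zero-width grids: B's direct indexing raises IndexError on empty/ragged input there, and on a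
-- zero-width grid zip(*) yields no tuples so the two representations of an m-by-0 grid ([] vs m empty rows) are equally defensible.
def Pre_rotate_map_and_coordinates (map : List (List String)) (x : Int) (y : Int) (orientation : String) : Prop :=
  (orientation = "N" ∨ orientation = "W" ∨ orientation = "S") →
    (map ≠ [] ∧ 0 < (map.getD 0 []).length ∧ ∀ row ∈ map, row.length = (map.getD 0 []).length)
instance (map : List (List String)) (x : Int) (y : Int) (orientation : String) : Decidable (Pre_rotate_map_and_coordinates map x y orientation) := by unfold Pre_rotate_map_and_coordinates; infer_instance

def pvWitness_rotate_map_and_coordinates : List (List String) × Int × Int × String := ([["a", "b"], ["c", "d"]], 1, 0, "N")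

def Spec_rotate_map_and_coordinates (map : List (List String)) (x : Int) (y : Int) (orientation : String) (out : List (List String) × Int × Int) : Prop := out = rotate_map_and_coordinates_alt map x y orientation
instance (map : List (List String)) (x : Int) (y : Int) (orientation : String) (out : List (List String) × Int × Int) : Decidable (Spec_rotate_map_and_coordinates map x y orientation out) := by unfold Spec_rotate_map_and_coordinates; infer_instance

-- ===== CLAIM (what is proved, stated in full; the proofs are below) =====
def Claim_equal_rotate_map_and_coordinates : Prop := ∀ (map : List (List String)) (x : Int) (y : Int) (orientation : String), Dom_rotate_map_and_coordinates map x y orientation → Pre_rotate_map_and_coordinates map x y orientation → Spec_rotate_map_and_coordinates map x y orientation (rotate_map_and_coordinates map x y orientation)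

-- ===== LEMMAS AND PROOFS =====

theorem pvFoldlMinRep (m : Nat) : ∀ n, List.foldl min m (List.replicate n m) = m := by
  intro n
  induction n with
  | zero => rfl
  | succ p ih => rw [List.replicate_succ, List.foldl_cons, min_self]; exact ih

-- on a rectangular grid the min row length is the common row length
theorem pvMinLen_rect (g : List (List String)) (hne : g ≠ [])
    (hrect : ∀ row ∈ g, row.length = (g.getD 0 []).length) :
    pvMinLen g = (g.getD 0 []).length := by
  rcases g with _ | ⟨a, t⟩
  · exact absurd rfl hne
  · set w := ((a :: t).getD 0 []).length with hw
    have h : (a :: t).map List.length = List.replicate (a :: t).length w := by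
      rw [List.eq_replicate_iff]
      constructor
      · simp
      · intro b hb
        rcases List.mem_map.mp hb with ⟨r, hr, rfl⟩
        exact hrect r hr
    unfold pvMinLen
    rw [h, List.length_cons, List.replicate_succ, PySem.List.min?_id_cons]
    simp [pvFoldlMinRep]

theorem pv_foldl_min_mem (t : List Nat) : ∀ (x c : Nat), x ∈ t → List.foldl min (min x c) t = List.foldl min c t := by
  induction t with
  | nil => intro x c h; cases h
  | cons y t' ih =>
    intro x c h
    rcases List.mem_cons.mp h with rfl | hx
    · simp only [List.foldl_cons]
      congr 1
      omega
    · simp only [List.foldl_cons]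
      rw [show min (min x c) y = min x (min c y) by omega]
      exact ih x (min c y) hx

theorem pvMin?_getD_reverse (L : List Nat) :
    (PySem.List.min? L.reverse (fun v => v)).getD 0 = (PySem.List.min? L (fun v => v)).getD 0 := by
  cases L with
  | nil => simp
  | cons a t =>
    cases hr : (a :: t).reverse with
    | nil => simp at hr
    | cons b s =>
      rw [PySem.List.min?_id_cons, PySem.List.min?_id_cons]
      simp only [Option.getD_some]
      have hperm : (b :: s).Perm (a :: t) := hr ▸ List.reverse_perm (a :: t)
      haveI : RightCommutative (min : Nat → Nat → Nat) := ⟨fun a b c => by omega⟩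
      have h1 := List.Perm.foldl_eq (f := (min : Nat → Nat → Nat)) hperm b
      simp only [List.foldl_cons] at h1
      rw [show min b b = b by omega] at h1
      rw [h1]
      have hb : b ∈ a :: t := hperm.subset (List.mem_cons_self ..)
      rcases List.mem_cons.mp hb with rfl | hbt
      · rw [show min b b = b by omega]
      · exact pv_foldl_min_mem t b a hbt

theorem pvMinLen_reverse (g : List (List String)) : pvMinLen g.reverse = pvMinLen g := by
  unfold pvMinLen
  rw [List.map_reverse]
  exact pvMin?_getD_reverse _

theorem pvMat_length (w m : Nat) (f : Nat → Nat → String) : (pvMat w m f).length = w := by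
  simp [pvMat]

theorem pvMat_get (w m : Nat) (f : Nat → Nat → String) {i j : Nat} (hi : i < w) (hj : j < m) :
    pvGet2 (pvMat w m f) i j = f i j := by
  simp [pvMat, pvGet2, List.getD, hi, hj]

theorem pvMinLen_mat (w m : Nat) (f : Nat → Nat → String) :
    pvMinLen (pvMat w m f) = if w = 0 then 0 else m := by
  unfold pvMinLen pvMat
  have h : ((List.range w).map (fun i => (List.range m).map (fun j => f i j))).map List.length
      = List.replicate w m := by
    simp [List.map_map, Function.comp_def]
  rw [h]
  cases w with
  | zero => simp [PySem.List.min?]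
  | succ n =>
    rw [List.replicate_succ, PySem.List.min?_id_cons]
    simp [pvFoldlMinRep]

theorem pvMat_congr {w m : Nat} {f f' : Nat → Nat → String}
    (h : ∀ i < w, ∀ j < m, f i j = f' i j) : pvMat w m f = pvMat w m f' := by
  unfold pvMat
  refine List.map_congr_left (fun i hi => ?_)
  refine List.map_congr_left (fun j hj => ?_)
  exact h i (List.mem_range.mp hi) j (List.mem_range.mp hj)

theorem pvZ (g : List (List String)) :
    pvZipStar g.reverse = pvMat (pvMinLen g) g.length (fun i j => pvGet2 g (g.length - 1 - j) i) := by
  unfold pvZipStar pvMat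
  rw [pvMinLen_reverse]
  refine List.map_congr_left (fun i _ => ?_)
  apply List.ext_getElem
  · simp
  · intro j h1 h2
    simp only [List.getElem_map, List.getElem_reverse, List.getElem_range]
    have hj : j < g.length := by simpa using h1
    have hlt : g.length - 1 - j < g.length := by omega
    simp [pvGet2, List.getD, hlt]

theorem pvRotMat (w m : Nat) (f : Nat → Nat → String) :
    pvZipStar (pvMat w m f).reverse
      = pvMat (if w = 0 then 0 else m) w (fun i j => f (w - 1 - j) i) := by
  rw [pvZ, pvMinLen_mat, pvMat_length]
  refine pvMat_congr (fun i hi j hj => ?_)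
  have hw : w ≠ 0 := by rintro rfl; omega
  have hi' : i < m := by simpa [hw] using hi
  exact pvMat_get w m f (by omega) hi'

theorem pvK_cases (o : String) :
    pvROTATIONS.getD o 0 = 0 ∨ (o = "N" ∧ pvROTATIONS.getD o 0 = 1)
      ∨ (o = "W" ∧ pvROTATIONS.getD o 0 = 2) ∨ (o = "S" ∧ pvROTATIONS.getD o 0 = 3) := by
  by_cases h2 : o = "N"; · subst h2; right; left; exact ⟨rfl, by decide⟩
  by_cases h3 : o = "W"; · subst h3; right; right; left; exact ⟨rfl, by decide⟩
  by_cases h4 : o = "S"; · subst h4; right; right; right; exact ⟨rfl, by decide⟩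
  by_cases h1 : o = "E"; · subst h1; left; decide
  left
  have e1 : ("E" == o) = false := beq_eq_false_iff_ne.mpr (Ne.symm h1)
  have e2 : ("N" == o) = false := beq_eq_false_iff_ne.mpr (Ne.symm h2)
  have e3 : ("W" == o) = false := beq_eq_false_iff_ne.mpr (Ne.symm h3)
  have e4 : ("S" == o) = false := beq_eq_false_iff_ne.mpr (Ne.symm h4)
  simp [pvROTATIONS, PySem.Dict.getD, PySem.Dict.get?, List.find?, e1, e2, e3, e4]

-- ===== VERDICT (by name: the statement is the Claim_ definition above) =====
theorem rotate_map_and_coordinates_spec : Claim_equal_rotate_map_and_coordinates := by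
  intro g x y o _ hpre
  unfold Spec_rotate_map_and_coordinates rotate_map_and_coordinates rotate_map_and_coordinates_alt
  rcases pvK_cases o with hk | ⟨ho, hk⟩ | ⟨ho, hk⟩ | ⟨ho, hk⟩
  · rw [hk]; norm_num
  · obtain ⟨hne, hwpos, hrect⟩ := hpre (by subst ho; tauto)
    have hmin : pvMinLen g = (g[0]?.getD []).length := by simpa [List.getD] using pvMinLen_rect g hne hrect
    rw [hk]; norm_num
    rw [pvZ, hmin]
  · obtain ⟨hne, hwpos, hrect⟩ := hpre (by subst ho; tauto)
    have hmin : pvMinLen g = (g[0]?.getD []).length := by simpa [List.getD] using pvMinLen_rect g hne hrect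
    have hw : ¬ (g[0]?.getD []).length = 0 := by simp [List.getD] at hwpos; omega
    rw [hk]; norm_num
    rw [show List.range (Int.toNat 2) = [0, 1] from rfl]
    simp only [List.foldl_cons, List.foldl_nil]
    rw [pvZ g, hmin, pvRotMat]
    refine ⟨by simp [hw], ?_, trivial⟩
    simp [pvMat_length, hmin]
  · obtain ⟨hne, hwpos, hrect⟩ := hpre (by subst ho; tauto)
    have hmin : pvMinLen g = (g[0]?.getD []).length := by simpa [List.getD] using pvMinLen_rect g hne hrect
    have hw : ¬ (g[0]?.getD []).length = 0 := by simp [List.getD] at hwpos; omega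
    have hm : 0 < g.length := List.length_pos_iff.mpr hne
    rw [hk]; norm_num
    rw [show List.range (Int.toNat 3) = [0, 1, 2] from rfl]
    simp only [List.foldl_cons, List.foldl_nil]
    rw [pvZ g, hmin, pvRotMat, pvRotMat]
    simp only [if_neg hw, if_neg (by omega : ¬ g.length = 0), pvMat_length]
    refine ⟨?_, ?_, trivial⟩
    · refine pvMat_congr (fun i hi j hj => ?_)
      rw [show g.length - 1 - (g.length - 1 - j) = j from by omega]
    · ring
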